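-- pv_equiv track=rewrite | github.com/mahdirezaie336/BinaryPuzzle | main.py | more_than_two_digits
-- ===== SOURCE A (Python) =====
-- def more_than_two_digits(cell) -> bool:
--     """ A constraint functions which checks if there is more than
--         two same digits in a cell consecutive. """
--     cell_str = str(cell)
--     count = 0
--     last_digit = ''
--     for char in cell_str:
--         if char == last_digit:
--             count += 1
--         else:
--             count = 0
--             last_digit = char
--         if count == 2:
--             return False
--     return True
-- ===== SOURCE B (Python) =====
-- def more_than_two_digits(cell) -> bool:
--     """True iff no character occurs three times consecutively in str(cell):
--     for each distinct character, its tripling must not be a substring."""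
--     s = str(cell)
--     return all(ch * 3 not in s for ch in set(s))
-- ===== Notes on version B (the rewrite author's own statement) =====
-- stated objective: simpler
-- what changed: Replaced A's stateful counter/last_digit scan with a per-distinct-character substring test: build the set of characters of str(cell) and require that no character's tripling occurs as a substring.
import Mathlib
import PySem

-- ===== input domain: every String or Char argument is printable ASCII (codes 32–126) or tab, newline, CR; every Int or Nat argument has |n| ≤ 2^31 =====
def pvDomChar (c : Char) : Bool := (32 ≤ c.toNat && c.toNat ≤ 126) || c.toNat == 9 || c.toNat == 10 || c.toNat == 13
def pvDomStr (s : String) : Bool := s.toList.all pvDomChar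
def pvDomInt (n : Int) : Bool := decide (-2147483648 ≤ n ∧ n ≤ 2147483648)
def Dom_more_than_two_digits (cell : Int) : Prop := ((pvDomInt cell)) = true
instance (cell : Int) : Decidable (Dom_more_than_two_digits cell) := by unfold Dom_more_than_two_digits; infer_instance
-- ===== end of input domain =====

-- B is a simpler alternative of similar cost: a per-distinct-character substring test instead of A's stateful counter scan.

-- ===== PORT A =====
-- A's for-loop with early return: state = (count, last_digit); last_digit starts as '' (no
-- single char equals ''), modelled as Option Char with none as the initial value.
def pvLoopA : List Char → Int → Option Char → Bool
  | [], _, _ => true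
  | ch :: cs, count, last =>
    let p : Int × Option Char := if (some ch == last) then (count + 1, last) else (0, some ch)
    if p.1 == 2 then false else pvLoopA cs p.1 p.2

def more_than_two_digits (cell : Int) : Bool :=
  pvLoopA (PySem.Int.toStr cell).toList 0 none

-- ===== PORT B =====
-- Source B: s = str(cell); all(ch * 3 not in s for ch in set(s))
def more_than_two_digits_alt (cell : Int) : Bool :=
  let s := (PySem.Int.toStr cell).toList
  (PySem.Set.ofList s).all (fun ch => !(PySem.Chars.isIn [ch, ch, ch] s))

-- ===== PRECONDITION & SPEC =====
def Spec_more_than_two_digits (cell : Int) (out : Bool) : Prop := out = more_than_two_digits_alt cell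
instance (cell : Int) (out : Bool) : Decidable (Spec_more_than_two_digits cell out) := by unfold Spec_more_than_two_digits; infer_instance

-- ===== CLAIM =====
def Claim_equal_more_than_two_digits : Prop := ∀ (cell : Int), Dom_more_than_two_digits cell → Spec_more_than_two_digits cell (more_than_two_digits cell)

-- ===== LEMMAS AND PROOFS =====

-- bridge predicate: no three consecutive equal characters
def pvNoTriple : List Char → Bool
  | a :: b :: c :: t => if a == b && b == c then false else pvNoTriple (b :: c :: t)
  | _ => true

theorem pvLoopA_state (cs : List Char) : ∀ x : Char,
    pvLoopA cs 0 (some x) = pvNoTriple (x :: cs) ∧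
    pvLoopA cs 1 (some x) = pvNoTriple (x :: x :: cs) := by
  induction cs with
  | nil => intro x; constructor <;> simp [pvLoopA, pvNoTriple]
  | cons c cs ih =>
    intro x
    by_cases h : c = x
    · subst h
      refine ⟨?_, ?_⟩
      · simpa [pvLoopA, pvNoTriple] using (ih c).2
      · cases cs with
        | nil => simp [pvLoopA, pvNoTriple]
        | cons d t => simp [pvLoopA, pvNoTriple]
    · have h' : ¬ x = c := fun e => h e.symm
      have hstep0 : pvLoopA (c :: cs) 0 (some x) = pvLoopA cs 0 (some c) := by
        simp [pvLoopA, h]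
      have hstep1 : pvLoopA (c :: cs) 1 (some x) = pvLoopA cs 0 (some c) := by
        simp [pvLoopA, h]
      refine ⟨?_, ?_⟩
      · rw [hstep0, (ih c).1]
        cases cs with
        | nil => simp [pvNoTriple]
        | cons d t => simp [pvNoTriple, h']
      · rw [hstep1, (ih c).1]
        cases cs with
        | nil => simp [pvNoTriple, h']
        | cons d t => simp [pvNoTriple, h']

theorem pvLoopA_eq_noTriple (cs : List Char) : pvLoopA cs 0 none = pvNoTriple cs := by
  cases cs with
  | nil => rfl
  | cons c cs => simpa [pvLoopA] using (pvLoopA_state cs c).1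

-- characterisation: pvNoTriple holds iff no tripled character is an infix
theorem pvNoTriple_iff : ∀ cs : List Char,
    pvNoTriple cs = true ↔ ∀ x : Char, ¬ ([x, x, x] <:+: cs)
  | [] => by
    refine ⟨fun _ x h => ?_, fun _ => by simp [pvNoTriple]⟩
    simpa using h.length_le
  | [a] => by
    refine ⟨fun _ x h => ?_, fun _ => by simp [pvNoTriple]⟩
    simpa using h.length_le
  | [a, b] => by
    refine ⟨fun _ x h => ?_, fun _ => by simp [pvNoTriple]⟩
    simpa using h.length_le
  | a :: b :: c :: t => by
    by_cases h : a = b ∧ b = c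
    · obtain ⟨h1, h2⟩ := h
      subst h1; subst h2
      simp only [pvNoTriple, beq_self_eq_true, Bool.and_self, if_true]
      constructor
      · intro hfalse; cases hfalse
      · intro hall
        exact absurd (show [a, a, a] <:+: a :: a :: a :: t from ⟨[], t, rfl⟩) (hall a)
    · have hstep : pvNoTriple (a :: b :: c :: t) = pvNoTriple (b :: c :: t) := by
        by_cases hab : a = b
        · subst hab
          have : ¬ a = c := fun e => h ⟨rfl, e⟩
          simp [pvNoTriple, this]
        · simp [pvNoTriple, hab]
      rw [hstep, pvNoTriple_iff (b :: c :: t)]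
      constructor
      · intro hn x hx
        rcases List.infix_cons_iff.mp hx with hp | hi
        · rcases List.cons_prefix_cons.mp hp with ⟨e1, hp2⟩
          rcases List.cons_prefix_cons.mp hp2 with ⟨e2, hp3⟩
          rcases List.cons_prefix_cons.mp hp3 with ⟨e3, _⟩
          exact h ⟨by rw [← e1, ← e2], by rw [← e2, ← e3]⟩
        · exact hn x hi
      · intro hn x hx
        exact hn x (List.infix_cons hx)
termination_by cs => cs.length

theorem alt_eq_noTriple (cs : List Char) :
    (PySem.Set.ofList cs).all (fun ch => !(PySem.Chars.isIn [ch, ch, ch] cs)) = pvNoTriple cs := by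
  rcases hb : pvNoTriple cs with _ | _
  · -- pvNoTriple = false: some x with [x,x,x] infix; x ∈ cs so the all fails
    have : ¬ ∀ x : Char, ¬ ([x, x, x] <:+: cs) := by
      intro hall
      exact absurd ((pvNoTriple_iff cs).mpr hall) (by simp [hb])
    push Not at this
    obtain ⟨x, hx⟩ := this
    have hmem : x ∈ cs := hx.subset (by simp)
    rw [List.all_eq_false]
    refine ⟨x, (PySem.Set.mem_ofList _ _).mpr hmem, ?_⟩
    simp [(PySem.Chars.isIn_iff_infix _ _).mpr hx]
  · rw [List.all_eq_true]
    intro x _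
    simp [(PySem.Chars.isIn_eq_false_iff _ _).mpr ((pvNoTriple_iff cs).mp hb x)]

-- ===== VERDICT =====
theorem more_than_two_digits_spec : Claim_equal_more_than_two_digits := by
  intro cell _
  unfold Spec_more_than_two_digits more_than_two_digits more_than_two_digits_alt
  rw [pvLoopA_eq_noTriple, alt_eq_noTriple]
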